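-- pv_equiv track=rewrite | github.com/imi/RUG | SpecialUS.py | fltrNlst
-- ===== SOURCE A (Python) =====
-- from typing import List, Tuple
--
-- def fltrNlst(flt: List, nlst: List) -> List[Tuple]:
--   nflt = [i for i in flt if "&" in i]
--   nnlst: List = []
--   for u in nlst:
--     valid: bool = True
--     for uu in range(min(len(nflt), len(u))):
--       if "&L" in nflt[uu]:
--         if not u[uu].isalpha():
--           valid = False
--           break
--       if "&N" in nflt[uu]:
--         if not u[uu].isdigit():
--           valid = False
--           break
--     if valid: nnlst.append(u)
--   return nnlst
-- ===== SOURCE B (Python) =====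
-- def fltrNlst(flt, nlst):
--   nflt = [i for i in flt if "&" in i]
--   surv = list(nlst)
--   for uu in range(len(nflt)):
--     f = nflt[uu]
--     wantL = "&L" in f
--     wantN = "&N" in f
--     surv = [u for u in surv
--             if len(u) <= uu or ((not wantL or u[uu].isalpha())
--                                 and (not wantN or u[uu].isdigit()))]
--   return surv
-- ===== Notes on version B (the rewrite author's own statement) =====
-- stated objective: alternative
-- what changed: B filters column-major: one pass per filter position over a shrinking survivor list, instead of A's per-row inner loop with break; rows shorter than the column skip that check.
import Mathlib
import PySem

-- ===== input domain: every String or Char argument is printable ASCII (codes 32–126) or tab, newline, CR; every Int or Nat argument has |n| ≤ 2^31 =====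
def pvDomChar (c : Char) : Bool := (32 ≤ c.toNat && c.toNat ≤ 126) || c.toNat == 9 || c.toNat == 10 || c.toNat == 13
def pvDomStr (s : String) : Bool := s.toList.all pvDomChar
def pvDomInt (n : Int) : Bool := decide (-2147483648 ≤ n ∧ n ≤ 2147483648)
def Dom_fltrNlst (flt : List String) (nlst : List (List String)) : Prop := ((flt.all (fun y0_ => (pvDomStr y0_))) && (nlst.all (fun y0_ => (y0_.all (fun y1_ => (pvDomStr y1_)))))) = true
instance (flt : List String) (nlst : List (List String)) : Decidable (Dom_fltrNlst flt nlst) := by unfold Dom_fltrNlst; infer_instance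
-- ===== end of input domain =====

-- B filters column-major (one pass per filter position over a shrinking survivor list)
-- instead of A's per-row inner loop with break; same return value, alternative decomposition.


-- ===== PORT A =====
-- inner loop: for uu in range(min(len(nflt), len(u))) with break; fuel = remaining steps
def fltrAvalid (nflt u : List String) : Nat → Nat → Bool
  | _, 0 => true
  | uu, Nat.succ n =>
    if PySem.Str.isIn "&L" (nflt.getD uu "") && !(PySem.Str.strIsalpha (u.getD uu "")) then false
    else if PySem.Str.isIn "&N" (nflt.getD uu "") && !(PySem.Str.strIsdigit (u.getD uu "")) then false
    else fltrAvalid nflt u (uu + 1) n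

def fltrNlst (flt : List String) (nlst : List (List String)) : List (List String) :=
  let nflt := flt.filter (fun i => PySem.Str.isIn "&" i)
  nlst.foldl (fun nnlst u =>
    if fltrAvalid nflt u 0 (min nflt.length u.length) then nnlst ++ [u] else nnlst) []

-- ===== PORT B =====
-- survival test of row u at filter column uu (Source B's comprehension condition)
def fltrBok (nflt : List String) (uu : Nat) (u : List String) : Bool :=
  decide (u.length ≤ uu) ||
    ((!(PySem.Str.isIn "&L" (nflt.getD uu "")) || PySem.Str.strIsalpha (u.getD uu "")) &&
     (!(PySem.Str.isIn "&N" (nflt.getD uu "")) || PySem.Str.strIsdigit (u.getD uu "")))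

def fltrNlst_alt (flt : List String) (nlst : List (List String)) : List (List String) :=
  let nflt := flt.filter (fun i => PySem.Str.isIn "&" i)
  (List.range nflt.length).foldl (fun surv uu => surv.filter (fltrBok nflt uu)) nlst

-- ===== PRECONDITION & SPEC =====
def Spec_fltrNlst (flt : List String) (nlst : List (List String)) (out : List (List String)) : Prop := out = fltrNlst_alt flt nlst
instance (flt : List String) (nlst : List (List String)) (out : List (List String)) : Decidable (Spec_fltrNlst flt nlst out) := by unfold Spec_fltrNlst; infer_instance

-- ===== CLAIM (what is proved, stated in full; the proofs are below) =====
def Claim_equal_fltrNlst : Prop := ∀ (flt : List String) (nlst : List (List String)), Dom_fltrNlst flt nlst → Spec_fltrNlst flt nlst (fltrNlst flt nlst)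

-- ===== LEMMAS AND PROOFS =====

-- A's inner loop succeeds iff every visited column passes both checks
theorem fltrAvalid_iff (nflt u : List String) (uu n : Nat) :
    fltrAvalid nflt u uu n = true ↔
      ∀ k, k < n →
        (!(PySem.Str.isIn "&L" (nflt.getD (uu + k) "") && !(PySem.Str.strIsalpha (u.getD (uu + k) ""))) &&
         !(PySem.Str.isIn "&N" (nflt.getD (uu + k) "") && !(PySem.Str.strIsdigit (u.getD (uu + k) "")))) = true := by
  induction n generalizing uu with
  | zero => simp [fltrAvalid]
  | succ n ih =>
    simp only [fltrAvalid]
    split_ifs with h1 h2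
    · simp only [false_iff]
      intro h
      have := h 0 (by omega)
      rw [Nat.add_zero, h1] at this
      simp only [Bool.not_true, Bool.false_and] at this
      exact Bool.false_ne_true this
    · simp only [false_iff]
      intro h
      have := h 0 (by omega)
      rw [Nat.add_zero, h2] at this
      simp only [Bool.not_true, Bool.and_false] at this
      exact Bool.false_ne_true this
    · rw [ih]
      simp only [Bool.not_eq_true] at h1 h2
      constructor
      · intro h k hk
        match k with
        | 0 =>
          rw [Nat.add_zero, h1, h2]
          rfl
        | k + 1 =>
          have e : uu + (k + 1) = (uu + 1) + k := by omega
          rw [e]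
          exact h k (by omega)
      · intro h k hk
        have e : (uu + 1) + k = uu + (k + 1) := by omega
        rw [e]
        exact h (k + 1) (by omega)

-- B's column-major loop equals one filter with the conjunction of all columns
theorem fltrB_foldl (nflt : List String) (n : Nat) (s : List (List String)) :
    (List.range n).foldl (fun surv uu => surv.filter (fltrBok nflt uu)) s =
      s.filter (fun u => decide (∀ uu, uu < n → fltrBok nflt uu u = true)) := by
  induction n generalizing s with
  | zero => simp
  | succ n ih =>
    rw [List.range_succ, List.foldl_append, ih]
    simp only [List.foldl_cons, List.foldl_nil, List.filter_filter]
    apply List.filter_congr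
    intro u _
    rw [Bool.eq_iff_iff]
    simp only [Bool.and_eq_true, decide_eq_true_eq]
    constructor
    · rintro ⟨h1, h2⟩ uu huu
      rcases Nat.lt_succ_iff_lt_or_eq.mp huu with h | h
      · exact h2 uu h
      · subst h; exact h1
    · intro h
      exact ⟨h n (Nat.lt_succ_self n), fun uu huu => h uu (Nat.lt_succ_of_lt huu)⟩

-- the two checks at one in-range column are the same boolean
theorem col_agree (a b c d : Bool) : (!(a && !c) && !(b && !d)) = ((!a || c) && (!b || d)) := by
  cases a <;> cases b <;> cases c <;> cases d <;> rfl

-- pointwise agreement of the two row predicates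
theorem pred_agree (nflt u : List String) :
    fltrAvalid nflt u 0 (min nflt.length u.length) = true ↔
      ∀ uu, uu < nflt.length → fltrBok nflt uu u = true := by
  rw [fltrAvalid_iff]
  constructor
  · intro h uu huu
    unfold fltrBok
    by_cases hlen : u.length ≤ uu
    · rw [decide_eq_true hlen, Bool.true_or]
    · have := h uu (by omega)
      rw [Nat.zero_add, col_agree] at this
      rw [this, Bool.or_true]
  · intro h k hk
    have huu : k < nflt.length := by omega
    have hlen : ¬ u.length ≤ k := by omega
    have hb := h k huu
    unfold fltrBok at hb
    rw [decide_eq_false hlen, Bool.false_or] at hb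
    rw [Nat.zero_add, col_agree]
    exact hb

-- ===== VERDICT (by name: the statement is the Claim_ definition above) =====
theorem fltrNlst_spec : Claim_equal_fltrNlst := by
  intro flt nlst _
  unfold Spec_fltrNlst fltrNlst fltrNlst_alt
  set nflt := flt.filter (fun i => PySem.Str.isIn "&" i) with hnflt
  rw [PySem.List.foldl_append_if_eq_filter, fltrB_foldl]
  simp only [List.nil_append]
  apply List.filter_congr
  intro u _
  rw [Bool.eq_iff_iff, pred_agree]
  simp
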